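-- pv_equiv track=rewrite | github.com/ethierlab/Decoder-Processing | single_channel.py | parse_channels
-- ===== SOURCE A (Python) =====
-- def parse_channels(input_text):
--     channels = set()
--     input_text = input_text.replace(' ', '')  # Remove spaces
--     if input_text:
--         for part in input_text.split(','):
--             if '-' in part:
--                 start, end = map(int, part.split('-'))
--                 channels.update(range(start, end + 1))
--             else:
--                 channels.add(int(part))
--     return sorted(channels)
-- ===== SOURCE B (Python) =====
-- def _bounds(part):
--     if '-' in part:
--         start, end = map(int, part.split('-'))
--     else:
--         start = end = int(part)
--     return start, end
--
--
-- def parse_channels(input_text):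
--     text = input_text.replace(' ', '')
--     if not text:
--         return []
--     intervals = []
--     for part in text.split(','):
--         start, end = _bounds(part)
--         if start <= end:
--             intervals.append((start, end))
--     intervals.sort(key=lambda iv: iv[0])
--     result = []
--     for start, end in intervals:
--         if result and start <= result[-1] + 1:
--             last = result[-1]
--             if end > last:
--                 result.extend(range(last + 1, end + 1))
--         else:
--             result.extend(range(start, end + 1))
--     return result
-- ===== Notes on version B (the rewrite author's own statement) =====
-- stated objective: alternative
-- what changed: Replaces A's hash-set accumulation of every expanded channel followed by a global sort with an interval representation: each comma token becomes a (start,end) pair, the pairs are sorted by start and merged/expanded in one linear pass, so individual channels are never deduplicated through a set.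
import Mathlib
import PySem

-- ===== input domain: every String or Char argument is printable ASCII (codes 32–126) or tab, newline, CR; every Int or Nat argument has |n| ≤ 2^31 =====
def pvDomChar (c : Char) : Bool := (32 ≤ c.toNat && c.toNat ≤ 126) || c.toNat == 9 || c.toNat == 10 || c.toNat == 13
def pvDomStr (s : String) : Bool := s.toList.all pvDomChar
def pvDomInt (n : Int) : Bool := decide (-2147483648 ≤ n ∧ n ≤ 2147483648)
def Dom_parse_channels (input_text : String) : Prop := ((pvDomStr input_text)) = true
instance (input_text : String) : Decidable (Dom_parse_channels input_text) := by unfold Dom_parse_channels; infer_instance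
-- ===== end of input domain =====

-- B replaces A's hash-set of expanded channels + sort with sorted (start,end) intervals merged and
-- expanded in one pass (objective: alternative decomposition, similar cost).


-- ===== PORT A =====
-- loop body of A's `for part in input_text.split(',')`
def pvStepA (acc : PySem.Set Int) (part : List Char) : PySem.Set Int :=
  if PySem.Chars.isIn ['-'] part then
    match PySem.Chars.split? part ['-'] with
    | some [a, b] =>
      match PySem.Int.ofChars? a, PySem.Int.ofChars? b with
      | some s, some e => (PySem.List.pyRange s (e + 1)).foldl (fun ac v => ac.add v) acc
      | _, _ => acc   -- Python raises ValueError here; excluded by Pre_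
    | _ => acc        -- Python raises ValueError here; excluded by Pre_
  else
    match PySem.Int.ofChars? part with
    | some v => acc.add v
    | none => acc     -- Python raises ValueError here; excluded by Pre_

def parse_channels (input_text : String) : List Int :=
  let t := (PySem.Str.replace input_text " " "").toList
  let channels : PySem.Set Int :=
    if t.isEmpty then PySem.Set.empty
    else ((PySem.Chars.split? t [',']).getD []).foldl pvStepA PySem.Set.empty
  PySem.List.sorted channels id

-- ===== PORT B =====
-- `_bounds(part)`: none exactly where Python raises ValueError (excluded by Pre_)
def pvBounds? (part : List Char) : Option (Int × Int) :=
  if PySem.Chars.isIn ['-'] part then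
    match PySem.Chars.split? part ['-'] with
    | some [a, b] =>
      match PySem.Int.ofChars? a, PySem.Int.ofChars? b with
      | some s, some e => some (s, e)
      | _, _ => none
    | _ => none
  else
    match PySem.Int.ofChars? part with
    | some v => some (v, v)
    | none => none

-- body of B's first loop (collect intervals)
def pvCollect (acc : List (Int × Int)) (part : List Char) : List (Int × Int) :=
  match pvBounds? part with
  | some (s, e) => if s ≤ e then acc ++ [(s, e)] else acc
  | none => acc     -- Python raises ValueError here; excluded by Pre_

-- body of B's second loop (merge/expand the sorted intervals)
def pvMergeStep (res : List Int) (se : Int × Int) : List Int :=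
  match PySem.List.pyGet? res (-1) with
  | some last =>
    if se.1 ≤ last + 1 then
      if last < se.2 then res ++ PySem.List.pyRange (last + 1) (se.2 + 1) else res
    else res ++ PySem.List.pyRange se.1 (se.2 + 1)
  | none => res ++ PySem.List.pyRange se.1 (se.2 + 1)

def parse_channels_alt (input_text : String) : List Int :=
  let t := (PySem.Str.replace input_text " " "").toList
  if t.isEmpty then []
  else
    let intervals := ((PySem.Chars.split? t [',']).getD []).foldl pvCollect []
    (PySem.List.sorted intervals (fun iv => iv.1)).foldl pvMergeStep []

-- ===== PRECONDITION & SPEC =====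
-- a comma token on which Python's int() calls (and the 2-tuple unpacking) succeed
def pvValidTok (part : List Char) : Bool :=
  if PySem.Chars.isIn ['-'] part then
    match PySem.Chars.split? part ['-'] with
    | some [a, b] => (PySem.Int.ofChars? a).isSome && (PySem.Int.ofChars? b).isSome
    | _ => false
  else (PySem.Int.ofChars? part).isSome

-- Pre_ excludes exactly the inputs on which Python A raises ValueError: some comma token (after
-- removing spaces) is not a valid int literal, or a dash token does not split into exactly two of them.
def Pre_parse_channels (input_text : String) : Prop :=
  (PySem.Str.replace input_text " " "").toList = [] ∨
    ∀ part ∈ (PySem.Chars.split? (PySem.Str.replace input_text " " "").toList [',']).getD [],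
      pvValidTok part = true
instance (input_text : String) : Decidable (Pre_parse_channels input_text) := by
  unfold Pre_parse_channels; infer_instance

def pvWitness_parse_channels : String := "1-3, 7,2, 9-9"

def Spec_parse_channels (input_text : String) (out : List Int) : Prop := out = parse_channels_alt input_text
instance (input_text : String) (out : List Int) : Decidable (Spec_parse_channels input_text out) := by unfold Spec_parse_channels; infer_instance

-- ===== CLAIM (what is proved, stated in full; the proofs are below) =====
def Claim_equal_parse_channels : Prop := ∀ (input_text : String), Dom_parse_channels input_text → Pre_parse_channels input_text → Spec_parse_channels input_text (parse_channels input_text)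

-- ===== LEMMAS AND PROOFS =====

theorem pvGet_neg_one (l : List Int) : PySem.List.pyGet? l (-1) = l.getLast? := by
  cases l with
  | nil => rfl
  | cons a t => simp [PySem.List.pyGet?, PySem.List.pyIdx?, List.getLast?_eq_getElem?]

theorem pvRange_nil {a b : Int} (h : b ≤ a) : PySem.List.pyRange a b = [] := by
  cases hr : PySem.List.pyRange a b with
  | nil => rfl
  | cons x t =>
    have hx : x ∈ PySem.List.pyRange a b := by rw [hr]; exact List.mem_cons_self
    rw [PySem.List.mem_pyRange_one] at hx; omega

theorem pvRange_pairwise_aux (b : Int) : ∀ (n : Nat) (a : Int), a < b → (b - a).toNat = n →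
    (PySem.List.pyRange a b).Pairwise (· < ·) := by
  intro n
  induction n with
  | zero => intro a h hk; omega
  | succ n ih =>
    intro a h hk
    rw [PySem.List.pyRange_one_cons h]
    refine List.Pairwise.cons (fun x hx => ?_) ?_
    · rw [PySem.List.mem_pyRange_one] at hx; omega
    · by_cases h2 : a + 1 < b
      · exact ih (a + 1) h2 (by omega)
      · rw [pvRange_nil (by omega)]; simp

theorem pvRange_pairwise (a b : Int) : (PySem.List.pyRange a b).Pairwise (· < ·) := by
  by_cases h : a < b
  · exact pvRange_pairwise_aux b _ a h rfl
  · rw [pvRange_nil (by omega)]; simp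

theorem pvRange_getLast {a b : Int} (h : a ≤ b) :
    (PySem.List.pyRange a (b + 1)).getLast? = some b := by
  rw [PySem.List.pyRange_one_succ_right h]; simp

theorem pv_mem_foldl_add (l : List Int) (acc : PySem.Set Int) (x : Int) :
    x ∈ l.foldl (fun ac v => PySem.Set.add ac v) acc ↔ x ∈ acc ∨ x ∈ l := by
  induction l generalizing acc with
  | nil => simp
  | cons y t ih => simp [ih, PySem.Set.mem_add]; tauto

theorem pv_nodup_foldl_add (l : List Int) (acc : PySem.Set Int) (h : acc.Nodup) :
    (l.foldl (fun ac v => PySem.Set.add ac v) acc).Nodup := by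
  induction l generalizing acc with
  | nil => exact h
  | cons y t ih => exact ih _ (PySem.Set.nodup_add acc y h)

-- A's loop body acts like B's `_bounds` followed by a range update
theorem pvStepA_eq (acc : PySem.Set Int) (part : List Char) :
    pvStepA acc part =
      match pvBounds? part with
      | some (s, e) => (PySem.List.pyRange s (e + 1)).foldl (fun ac v => ac.add v) acc
      | none => acc := by
  unfold pvStepA pvBounds?
  split
  · rcases hsp : PySem.Chars.split? part ['-'] with _ | ps
    · rfl
    · match ps with
      | [] => rfl
      | [a] => rfl
      | a :: b :: c :: t => rfl
      | [a, b] =>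
        rcases hca : PySem.Int.ofChars? a with _ | s <;>
          rcases hcb : PySem.Int.ofChars? b with _ | e <;> simp [hca, hcb]
  · rcases hcp : PySem.Int.ofChars? part with _ | v
    · rfl
    · simp

theorem pv_mem_stepA (acc : PySem.Set Int) (part : List Char) (x : Int) :
    x ∈ pvStepA acc part ↔
      x ∈ acc ∨ ∃ se, pvBounds? part = some se ∧ se.1 ≤ x ∧ x ≤ se.2 := by
  rw [pvStepA_eq]
  rcases hb : pvBounds? part with _ | ⟨s, e⟩
  · simp
  · simp [pv_mem_foldl_add, PySem.List.mem_pyRange_one]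

theorem pv_nodup_stepA (acc : PySem.Set Int) (part : List Char) (h : acc.Nodup) :
    (pvStepA acc part).Nodup := by
  rw [pvStepA_eq]
  rcases pvBounds? part with _ | ⟨s, e⟩
  · exact h
  · exact pv_nodup_foldl_add _ _ h

theorem pv_mem_foldA (parts : List (List Char)) (acc : PySem.Set Int) (x : Int) :
    x ∈ parts.foldl pvStepA acc ↔
      x ∈ acc ∨ ∃ p ∈ parts, ∃ se, pvBounds? p = some se ∧ se.1 ≤ x ∧ x ≤ se.2 := by
  induction parts generalizing acc with
  | nil => simp
  | cons p t ih => simp [ih, pv_mem_stepA, or_assoc]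

theorem pv_nodup_foldA (parts : List (List Char)) (acc : PySem.Set Int) (h : acc.Nodup) :
    (parts.foldl pvStepA acc).Nodup := by
  induction parts generalizing acc with
  | nil => exact h
  | cons p t ih => exact ih _ (pv_nodup_stepA acc p h)

theorem pv_mem_collect (parts : List (List Char)) (acc : List (Int × Int)) (iv : Int × Int) :
    iv ∈ parts.foldl pvCollect acc ↔
      iv ∈ acc ∨ (iv.1 ≤ iv.2 ∧ ∃ p ∈ parts, pvBounds? p = some iv) := by
  induction parts generalizing acc with
  | nil => simp
  | cons p t ih =>
    simp only [List.foldl_cons, ih]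
    have hstep : iv ∈ pvCollect acc p ↔ iv ∈ acc ∨ (iv.1 ≤ iv.2 ∧ pvBounds? p = some iv) := by
      unfold pvCollect
      rcases pvBounds? p with _ | ⟨s, e⟩
      · simp
      · by_cases hc : s ≤ e
        · simp only [if_pos hc, List.mem_append, List.mem_singleton]
          constructor
          · rintro (h | h)
            · exact Or.inl h
            · subst h; exact Or.inr ⟨hc, rfl⟩
          · rintro (h | ⟨h1, h2⟩)
            · exact Or.inl h
            · injection h2 with h2; exact Or.inr h2.symm
        · simp only [if_neg hc]
          constructor
          · exact Or.inl
          · rintro (h | ⟨h1, h2⟩)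
            · exact h
            · injection h2 with h2; subst h2; simp at h1; omega
    rw [hstep]
    simp
    tauto

theorem pv_merge_spec : ∀ (ivs : List (Int × Int)) (res : List Int),
    ivs.Pairwise (fun p q => p.1 ≤ q.1) →
    (∀ iv ∈ ivs, iv.1 ≤ iv.2) →
    res.Pairwise (· < ·) →
    (res = [] ∨ ∃ L, res.getLast? = some L ∧ (∀ x ∈ res, x ≤ L) ∧
        (∀ q ∈ ivs, ∀ x, q.1 ≤ x → x ≤ L → x ∈ res)) →
    (ivs.foldl pvMergeStep res).Pairwise (· < ·) ∧
    (∀ x, x ∈ ivs.foldl pvMergeStep res ↔ x ∈ res ∨ ∃ iv ∈ ivs, iv.1 ≤ x ∧ x ≤ iv.2) := by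
  intro ivs
  induction ivs with
  | nil => intro res _ _ hpw _; exact ⟨hpw, by simp⟩
  | cons hd tl ih =>
    rintro res hsort hle hpw hinv
    rcases hd with ⟨s, e⟩
    have hse : s ≤ e := hle _ List.mem_cons_self
    have hs_tl : ∀ q ∈ tl, s ≤ q.1 := by
      intro q hq; exact (List.pairwise_cons.mp hsort).1 q hq
    have hsort_tl := (List.pairwise_cons.mp hsort).2
    have hle_tl : ∀ iv ∈ tl, iv.1 ≤ iv.2 := fun iv h => hle iv (List.mem_cons_of_mem _ h)
    simp only [List.foldl_cons]
    rcases hinv with hnil | ⟨L, hlast, hub, hcov⟩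
    · -- res = []
      subst hnil
      have hstep : pvMergeStep [] (s, e) = PySem.List.pyRange s (e + 1) := by
        unfold pvMergeStep; rw [pvGet_neg_one]; simp
      rw [hstep]
      have hmem : ∀ x : Int, x ∈ PySem.List.pyRange s (e + 1) ↔ s ≤ x ∧ x ≤ e := by
        intro x; rw [PySem.List.mem_pyRange_one]; omega
      obtain ⟨hpw2, hm2⟩ := ih (PySem.List.pyRange s (e + 1)) hsort_tl hle_tl
        (pvRange_pairwise _ _)
        (Or.inr ⟨e, pvRange_getLast hse, fun x hx => ((hmem x).mp hx).2,
          fun q hq x hqx hxe => (hmem x).mpr ⟨le_trans (hs_tl q hq) hqx, hxe⟩⟩)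
      refine ⟨hpw2, fun x => ?_⟩
      rw [hm2 x, hmem x]; simp
    · have hget : PySem.List.pyGet? res (-1) = some L := by rw [pvGet_neg_one, hlast]
      by_cases hsl : s ≤ L + 1
      · by_cases hel : L < e
        · -- extend with (L+1 .. e]
          have hstep : pvMergeStep res (s, e) = res ++ PySem.List.pyRange (L + 1) (e + 1) := by
            unfold pvMergeStep; rw [hget]; simp [hsl, hel]
          rw [hstep]
          have hmemR : ∀ x : Int, x ∈ res ++ PySem.List.pyRange (L + 1) (e + 1) ↔
              x ∈ res ∨ (L + 1 ≤ x ∧ x ≤ e) := by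
            intro x
            simp only [List.mem_append, PySem.List.mem_pyRange_one]
            constructor
            · rintro (h | h)
              · exact Or.inl h
              · exact Or.inr ⟨h.1, by omega⟩
            · rintro (h | h)
              · exact Or.inl h
              · exact Or.inr ⟨h.1, by omega⟩
          have hpw2 : (res ++ PySem.List.pyRange (L + 1) (e + 1)).Pairwise (· < ·) := by
            rw [List.pairwise_append]
            refine ⟨hpw, pvRange_pairwise _ _, fun a ha b hb => ?_⟩
            have h1 := hub a ha
            have h2 := PySem.List.mem_pyRange_one.mp hb
            omega
          have hlast2 : (res ++ PySem.List.pyRange (L + 1) (e + 1)).getLast? = some e := by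
            rw [List.getLast?_append_of_ne_nil]
            · exact pvRange_getLast (by omega)
            · intro hn
              have hmm : (L : Int) + 1 ∈ PySem.List.pyRange (L + 1) (e + 1) :=
                PySem.List.mem_pyRange_one.mpr (by omega)
              rw [hn] at hmm; simp at hmm
          have hub2 : ∀ x ∈ res ++ PySem.List.pyRange (L + 1) (e + 1), x ≤ e := by
            intro x hx
            rcases (hmemR x).mp hx with h | h
            · exact le_trans (hub x h) (by omega)
            · omega
          have hcov2 : ∀ q ∈ tl, ∀ x, q.1 ≤ x → x ≤ e →
              x ∈ res ++ PySem.List.pyRange (L + 1) (e + 1) := by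
            intro q hq x hqx hxe
            rcases le_or_gt x L with hc | hc
            · exact (hmemR x).mpr (Or.inl (hcov q (List.mem_cons_of_mem _ hq) x hqx hc))
            · exact (hmemR x).mpr (Or.inr ⟨by omega, hxe⟩)
          obtain ⟨hpw3, hm3⟩ := ih (res ++ PySem.List.pyRange (L + 1) (e + 1)) hsort_tl hle_tl
            hpw2 (Or.inr ⟨e, hlast2, hub2, hcov2⟩)
          refine ⟨hpw3, fun x => ?_⟩
          rw [hm3 x, hmemR x]
          simp only [List.mem_cons, Prod.exists]
          constructor
          · rintro ((h | h) | h)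
            · exact Or.inl h
            · exact Or.inr ⟨s, e, Or.inl rfl, by omega, h.2⟩
            · rcases h with ⟨a, b, hab, h1, h2⟩
              exact Or.inr ⟨a, b, Or.inr hab, h1, h2⟩
          · rintro (h | ⟨a, b, hab | hab, h1, h2⟩)
            · exact Or.inl (Or.inl h)
            · injection hab with ha hb
              subst ha; subst hb
              rcases le_or_gt x L with hc | hc
              · exact Or.inl (Or.inl (hcov _ List.mem_cons_self x h1 hc))
              · exact Or.inl (Or.inr ⟨by omega, h2⟩)
            · exact Or.inr ⟨a, b, hab, h1, h2⟩
        · -- e ≤ L : interval already covered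
          have hstep : pvMergeStep res (s, e) = res := by
            unfold pvMergeStep; rw [hget]; simp [hsl]; omega
          rw [hstep]
          obtain ⟨hpw3, hm3⟩ := ih res hsort_tl hle_tl hpw
            (Or.inr ⟨L, hlast, hub, fun q hq => hcov q (List.mem_cons_of_mem _ hq)⟩)
          refine ⟨hpw3, fun x => ?_⟩
          rw [hm3 x]
          simp only [List.mem_cons, Prod.exists]
          constructor
          · rintro (h | ⟨a, b, hab, h1, h2⟩)
            · exact Or.inl h
            · exact Or.inr ⟨a, b, Or.inr hab, h1, h2⟩
          · rintro (h | ⟨a, b, hab | hab, h1, h2⟩)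
            · exact Or.inl h
            · injection hab with ha hb
              subst ha; subst hb
              exact Or.inl (hcov _ List.mem_cons_self x h1 (by omega))
            · exact Or.inr ⟨a, b, hab, h1, h2⟩
      · -- gap: L + 1 < s
        have hstep : pvMergeStep res (s, e) = res ++ PySem.List.pyRange s (e + 1) := by
          unfold pvMergeStep; rw [hget]; simp [hsl]
        rw [hstep]
        have hmemR : ∀ x : Int, x ∈ res ++ PySem.List.pyRange s (e + 1) ↔
            x ∈ res ∨ (s ≤ x ∧ x ≤ e) := by
          intro x
          simp only [List.mem_append, PySem.List.mem_pyRange_one]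
          constructor
          · rintro (h | h)
            · exact Or.inl h
            · exact Or.inr ⟨h.1, by omega⟩
          · rintro (h | h)
            · exact Or.inl h
            · exact Or.inr ⟨h.1, by omega⟩
        have hpw2 : (res ++ PySem.List.pyRange s (e + 1)).Pairwise (· < ·) := by
          rw [List.pairwise_append]
          refine ⟨hpw, pvRange_pairwise _ _, fun a ha b hb => ?_⟩
          have h1 := hub a ha
          have h2 := PySem.List.mem_pyRange_one.mp hb
          omega
        have hlast2 : (res ++ PySem.List.pyRange s (e + 1)).getLast? = some e := by
          rw [List.getLast?_append_of_ne_nil]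
          · exact pvRange_getLast hse
          · intro hn
            have hmm : s ∈ PySem.List.pyRange s (e + 1) :=
              PySem.List.mem_pyRange_one.mpr (by omega)
            rw [hn] at hmm; simp at hmm
        have hub2 : ∀ x ∈ res ++ PySem.List.pyRange s (e + 1), x ≤ e := by
          intro x hx
          rcases (hmemR x).mp hx with h | h
          · exact le_trans (hub x h) (by omega)
          · omega
        have hcov2 : ∀ q ∈ tl, ∀ x, q.1 ≤ x → x ≤ e →
            x ∈ res ++ PySem.List.pyRange s (e + 1) := by
          intro q hq x hqx hxe
          have := hs_tl q hq
          exact (hmemR x).mpr (Or.inr ⟨by omega, hxe⟩)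
        obtain ⟨hpw3, hm3⟩ := ih (res ++ PySem.List.pyRange s (e + 1)) hsort_tl hle_tl hpw2
          (Or.inr ⟨e, hlast2, hub2, hcov2⟩)
        refine ⟨hpw3, fun x => ?_⟩
        rw [hm3 x, hmemR x]
        simp only [List.mem_cons, Prod.exists]
        constructor
        · rintro ((h | h) | h)
          · exact Or.inl h
          · exact Or.inr ⟨s, e, Or.inl rfl, h.1, h.2⟩
          · rcases h with ⟨a, b, hab, h1, h2⟩
            exact Or.inr ⟨a, b, Or.inr hab, h1, h2⟩
        · rintro (h | ⟨a, b, hab | hab, h1, h2⟩)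
          · exact Or.inl (Or.inl h)
          · injection hab with ha hb
            subst ha; subst hb
            exact Or.inl (Or.inr ⟨h1, h2⟩)
          · exact Or.inr ⟨a, b, hab, h1, h2⟩

-- the two folds over the same token list produce the same sorted channel list
theorem pv_key (parts : List (List Char)) :
    PySem.List.sorted (parts.foldl pvStepA PySem.Set.empty) id
      = (PySem.List.sorted (parts.foldl pvCollect []) (fun iv => iv.1)).foldl pvMergeStep [] := by
  have hSnodup : (parts.foldl pvStepA PySem.Set.empty).Nodup :=
    pv_nodup_foldA parts PySem.Set.empty List.nodup_nil
  have hivs_pw := PySem.List.sorted_pairwise (parts.foldl pvCollect []) (fun iv => iv.1)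
  have hivs_perm := PySem.List.sorted_perm (parts.foldl pvCollect []) (fun iv => iv.1) false
  have hmem_ivs : ∀ iv, iv ∈ PySem.List.sorted (parts.foldl pvCollect []) (fun iv => iv.1) ↔
      iv ∈ parts.foldl pvCollect [] := fun iv => hivs_perm.mem_iff
  have hle : ∀ iv ∈ PySem.List.sorted (parts.foldl pvCollect []) (fun iv => iv.1), iv.1 ≤ iv.2 := by
    intro iv hiv
    rcases (pv_mem_collect parts [] iv).mp ((hmem_ivs iv).mp hiv) with h | h
    · simp at h
    · exact h.1
  obtain ⟨hRpw, hRmem⟩ := pv_merge_spec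
    (PySem.List.sorted (parts.foldl pvCollect []) (fun iv => iv.1)) []
    hivs_pw hle (by simp) (Or.inl rfl)
  refine PySem.List.sorted_eq_of_perm_of_pairwise_lt _ _ id ?_ ?_
  · rw [List.perm_ext_iff_of_nodup (hRpw.imp fun h => ne_of_lt h) hSnodup]
    intro x
    rw [hRmem x, pv_mem_foldA]
    simp only [List.not_mem_nil, false_or]
    constructor
    · rintro ⟨iv, hiv, h1, h2⟩
      rcases (pv_mem_collect parts [] iv).mp ((hmem_ivs iv).mp hiv) with h | h
      · simp at h
      · obtain ⟨-, p, hp, hb⟩ := h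
        exact Or.inr ⟨p, hp, iv, hb, h1, h2⟩
    · rintro (h | ⟨p, hp, se, hb, h1, h2⟩)
      · simp [PySem.Set.empty] at h
      · refine ⟨se, ?_, h1, h2⟩
        rw [hmem_ivs se, pv_mem_collect]
        exact Or.inr ⟨by omega, p, hp, hb⟩
  · exact hRpw

-- ===== VERDICT (by name: the statement is the Claim_ definition above) =====
theorem parse_channels_spec : Claim_equal_parse_channels := by
  intro input_text _ _
  unfold Spec_parse_channels parse_channels parse_channels_alt
  by_cases h : ((PySem.Str.replace input_text " " "").toList).isEmpty
  · simp only [h, if_true]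
    rfl
  · simp only [h]
    exact pv_key _
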